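-- pv_equiv track=rewrite | github.com/Promoraai-beta/Mcp-Servers | server-c-monitoring/src/analyzers/terminal_analyzer.py | _analyze_debug_commands
-- ===== SOURCE A (Python) =====
-- from typing import Dict, List, Any, Optional
--
-- def _analyze_debug_commands(commands: List[Dict]) -> Dict[str, Any]:
--     """Count exploration/debugging commands."""
--     exploration = [c for c in commands if c["category"] == "exploration"]
--     lint = [c for c in commands if c["category"] == "lint"]
--     build = [c for c in commands if c["category"] == "build"]
--     api_test = [c for c in commands if c["category"] == "api_test"]
--
--     return {
--         "explorationCommands": len(exploration),
--         "lintRuns": len(lint),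
--         "buildRuns": len(build),
--         "apiTests": len(api_test),
--     }
-- ===== SOURCE B (Python) =====
-- def _analyze_debug_commands(commands):
--     """Count exploration/debugging commands: one tally pass instead of four scans."""
--     counts = {}
--     for c in commands:
--         cat = c["category"]
--         counts[cat] = counts.get(cat, 0) + 1
--     return {
--         "explorationCommands": counts.get("exploration", 0),
--         "lintRuns": counts.get("lint", 0),
--         "buildRuns": counts.get("build", 0),
--         "apiTests": counts.get("api_test", 0),
--     }
-- ===== Notes on version B (the rewrite author's own statement) =====
-- stated objective: alternative
-- what changed: Replaces four filtering list comprehensions over commands with a single tally pass into a dict, then reads the four category counts with default 0.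
import Mathlib
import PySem

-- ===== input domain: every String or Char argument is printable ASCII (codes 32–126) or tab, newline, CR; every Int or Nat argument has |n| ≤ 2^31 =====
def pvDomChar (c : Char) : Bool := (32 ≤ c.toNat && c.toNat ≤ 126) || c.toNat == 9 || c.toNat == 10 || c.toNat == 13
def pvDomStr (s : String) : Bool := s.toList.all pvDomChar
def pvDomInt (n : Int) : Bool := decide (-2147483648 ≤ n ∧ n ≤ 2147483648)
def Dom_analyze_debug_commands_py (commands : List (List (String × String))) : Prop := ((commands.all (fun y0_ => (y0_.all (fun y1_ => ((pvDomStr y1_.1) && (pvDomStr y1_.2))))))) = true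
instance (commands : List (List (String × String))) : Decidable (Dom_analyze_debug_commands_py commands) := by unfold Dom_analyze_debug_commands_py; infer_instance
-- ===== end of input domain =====

-- B replaces A's four filtering passes over `commands` with a single tally pass into a dict (one scan instead of four).


-- shared primitive: Python's c["category"] on an association-list dict (first match);
-- Pre_ guarantees the key is present, so the `""` default is never used inside the claim.
def pvGetCategory (c : List (String × String)) : String :=
  ((c.find? (fun p => p.1 == "category")).map Prod.snd).getD ""

-- ===== PORT A =====
def analyze_debug_commands_py (commands : List (List (String × String))) : List (String × Int) :=
  let exploration := commands.filter (fun c => pvGetCategory c == "exploration")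
  let lint := commands.filter (fun c => pvGetCategory c == "lint")
  let build := commands.filter (fun c => pvGetCategory c == "build")
  let api_test := commands.filter (fun c => pvGetCategory c == "api_test")
  [("explorationCommands", (exploration.length : Int)),
   ("lintRuns", (lint.length : Int)),
   ("buildRuns", (build.length : Int)),
   ("apiTests", (api_test.length : Int))]

-- ===== PORT B =====
def analyze_debug_commands_py_alt (commands : List (List (String × String))) : List (String × Int) :=
  let counts := commands.foldl
    (fun d c => let cat := pvGetCategory c; d.insert cat (d.getD cat 0 + 1))
    (PySem.Dict.empty : PySem.Dict String Int)
  [("explorationCommands", counts.getD "exploration" 0),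
   ("lintRuns", counts.getD "lint" 0),
   ("buildRuns", counts.getD "build" 0),
   ("apiTests", counts.getD "api_test" 0)]

-- ===== PRECONDITION & SPEC =====
-- Pre_ excludes exactly the commands missing a "category" key, on which the Python A raises KeyError.
def Pre_analyze_debug_commands_py (commands : List (List (String × String))) : Prop :=
  (commands.all (fun c => (c.find? (fun p => p.1 == "category")).isSome)) = true
instance (commands : List (List (String × String))) : Decidable (Pre_analyze_debug_commands_py commands) := by unfold Pre_analyze_debug_commands_py; infer_instance

def pvWitness_analyze_debug_commands_py : (List (List (String × String))) :=
  [[("category", "lint")], [("category", "exploration"), ("cmd", "ls")]]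

def Spec_analyze_debug_commands_py (commands : List (List (String × String))) (out : List (String × Int)) : Prop := out = analyze_debug_commands_py_alt commands
instance (commands : List (List (String × String))) (out : List (String × Int)) : Decidable (Spec_analyze_debug_commands_py commands out) := by unfold Spec_analyze_debug_commands_py; infer_instance

-- ===== CLAIM (what is proved, stated in full; the proofs are below) =====
def Claim_equal_analyze_debug_commands_py : Prop := ∀ (commands : List (List (String × String))), Dom_analyze_debug_commands_py commands → Pre_analyze_debug_commands_py commands → Spec_analyze_debug_commands_py commands (analyze_debug_commands_py commands)

-- ===== LEMMAS AND PROOFS =====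

-- B's tally loop read at any key is the count of that key among the categories.
theorem pv_getD_fold_gen (cs : List (List (String × String))) (d : PySem.Dict String Int) (k : String) :
    (cs.foldl
      (fun d c => let cat := pvGetCategory c; d.insert cat (d.getD cat 0 + 1)) d).getD k 0
    = d.getD k 0 + ((cs.map pvGetCategory).count k : Int) := by
  induction cs generalizing d with
  | nil => simp
  | cons c cs ih =>
    simp only [List.foldl_cons, List.map_cons, ih, List.count_cons,
      PySem.Dict.getD_insert]
    by_cases h : k = pvGetCategory c
    · simp [h]; ring
    · simp [h, beq_iff_eq, Ne.symm h]

-- B's tally loop read at any key is the count of that key among the categories.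
theorem pv_getD_fold (commands : List (List (String × String))) (k : String) :
    (commands.foldl
      (fun d c => let cat := pvGetCategory c; d.insert cat (d.getD cat 0 + 1))
      (PySem.Dict.empty : PySem.Dict String Int)).getD k 0
    = ((commands.map pvGetCategory).count k : Int) := by
  rw [pv_getD_fold_gen]; simp

-- A's filter length equals the same count.
theorem pv_filter_count (commands : List (List (String × String))) (k : String) :
    (commands.filter (fun c => pvGetCategory c == k)).length
    = (commands.map pvGetCategory).count k := by
  rw [List.count, List.countP_map]
  induction commands with
  | nil => rfl
  | cons c cs ih => simp [List.filter_cons, List.countP_cons, Function.comp]; split_ifs with h <;> simp <;> omega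

-- ===== VERDICT (by name: the statement is the Claim_ definition above) =====
theorem analyze_debug_commands_py_spec : Claim_equal_analyze_debug_commands_py := by
  intro commands _ _
  unfold Spec_analyze_debug_commands_py analyze_debug_commands_py analyze_debug_commands_py_alt
  simp only [pv_getD_fold, ← pv_filter_count]
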